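-- pv_equiv track=rewrite | github.com/mijgame/AdventOfCode2020 | Day13b.py | make_offset_tuples
-- ===== SOURCE A (Python) =====
-- def make_offset_tuples(schedule):
--     result = []
--     offset = 1
--     for i in reversed(schedule):
--         if i == 'x':
--             offset += 1
--         else:
--             result.append((i, offset))
--             offset = 1
--     result.reverse()
--     return result
-- ===== SOURCE B (Python) =====
-- def make_offset_tuples(schedule):
--     buses = [(i, v) for i, v in enumerate(schedule) if v != 'x']
--     nexts = [i for i, _ in buses][1:] + [len(schedule)]
--     return [(v, nxt - i) for (i, v), nxt in zip(buses, nexts)]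
-- ===== Notes on version B (the rewrite author's own statement) =====
-- stated objective: alternative
-- what changed: Replaces A's reverse scan with a decreasing-offset accumulator by an index-table decomposition: enumerate-and-filter the non-'x' entries, then compute each offset as the difference to the next bus index (sentinel len(schedule)) via zip with the shifted index list.
import Mathlib
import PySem

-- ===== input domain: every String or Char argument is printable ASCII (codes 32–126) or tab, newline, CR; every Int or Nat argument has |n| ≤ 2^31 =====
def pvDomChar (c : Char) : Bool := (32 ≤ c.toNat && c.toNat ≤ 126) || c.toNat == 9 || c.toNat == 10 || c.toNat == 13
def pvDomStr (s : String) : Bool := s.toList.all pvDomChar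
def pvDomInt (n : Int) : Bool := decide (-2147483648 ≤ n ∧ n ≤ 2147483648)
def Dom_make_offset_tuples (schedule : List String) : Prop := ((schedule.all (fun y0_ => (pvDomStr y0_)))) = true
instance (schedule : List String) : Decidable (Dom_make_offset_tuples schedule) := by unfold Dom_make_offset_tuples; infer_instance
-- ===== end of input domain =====

-- B replaces A's reverse accumulator scan by an index table of the non-'x' positions
-- whose pairwise differences (with sentinel len(schedule)) give the offsets; objective: alternative.

-- ===== PORT A =====
-- reversed(schedule) loop with state (result, offset); result.append then final reverse
def make_offset_tuples (schedule : List String) : List (String × Int) :=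
  let st := schedule.reverse.foldl
    (fun (st : List (String × Int) × Int) i =>
      if i = "x" then (st.1, st.2 + 1) else (st.1 ++ [(i, st.2)], 1))
    ([], 1)
  st.1.reverse

-- ===== PORT B =====
def make_offset_tuples_alt (schedule : List String) : List (String × Int) :=
  let buses := (PySem.List.enumerate schedule).filter (fun p => p.2 != "x")
  let nexts := (buses.map Prod.fst).drop 1 ++ [(schedule.length : Int)]
  (buses.zip nexts).map (fun pq => (pq.1.2, pq.2 - pq.1.1))

-- ===== PRECONDITION & SPEC =====
def Spec_make_offset_tuples (schedule : List String) (out : List (String × Int)) : Prop := out = make_offset_tuples_alt schedule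
instance (schedule : List String) (out : List (String × Int)) : Decidable (Spec_make_offset_tuples schedule out) := by unfold Spec_make_offset_tuples; infer_instance

-- ===== CLAIM (what is proved, stated in full; the proofs are below) =====
def Claim_equal_make_offset_tuples : Prop := ∀ (schedule : List String), Dom_make_offset_tuples schedule → Spec_make_offset_tuples schedule (make_offset_tuples schedule)

-- ===== LEMMAS AND PROOFS =====

-- number of leading "x" entries
def pvLead (t : List String) : Nat := (t.takeWhile (fun v => v == "x")).length

-- forward distance from a bus to the next bus in t, or to the end plus e
def pvDist (t : List String) (e : Int) : Int :=
  (if pvLead t = t.length then e else 1) + (pvLead t : Nat)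

-- reference function: forward recursion, e is the extra distance past the end
def pvG : List String → Int → List (String × Int)
  | [], _ => []
  | h :: t, e => if h = "x" then pvG t e else (h, pvDist t e) :: pvG t e

-- A's loop over the reversed list, final-order result
def pvR : List String → Int → List (String × Int)
  | [], _ => []
  | h :: t, off => if h = "x" then pvR t (off + 1) else pvR t 1 ++ [(h, off)]

-- B's zip-with-shifted-indices in recursive form
def pvZ : List (Int × String) → Int → List (String × Int)
  | [], _ => []
  | (i, v) :: rest, n =>
      (v, (match rest with | [] => n | (j, _) :: _ => j) - i) :: pvZ rest n

theorem pvLead_cons (h : String) (t : List String) :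
    pvLead (h :: t) = if h = "x" then pvLead t + 1 else 0 := by
  by_cases hx : h = "x" <;> simp [pvLead, hx]

theorem pvLead_le (t : List String) : pvLead t ≤ t.length := by
  induction t with
  | nil => simp [pvLead]
  | cons h t ih =>
    rw [pvLead_cons]
    split_ifs <;> simp <;> omega

theorem pvLead_append (t : List String) (u : String) :
    pvLead (t ++ [u]) =
      if pvLead t = t.length then t.length + (if u = "x" then 1 else 0) else pvLead t := by
  induction t with
  | nil => by_cases h : u = "x" <;> simp [h, pvLead]
  | cons h t ih =>
    have hle := pvLead_le t
    by_cases hx : h = "x" <;>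
      rw [List.cons_append, pvLead_cons, pvLead_cons] <;>
      simp [hx, ih] <;> split_ifs <;> omega

theorem pvDist_append_x (t : List String) (e : Int) :
    pvDist (t ++ ["x"]) e = pvDist t (e + 1) := by
  have h := pvLead_append t "x"
  have hle := pvLead_le t
  by_cases hc : pvLead t = t.length
  · have h1 : pvLead (t ++ ["x"]) = t.length + 1 := by simp [h, hc]
    have h2 : pvLead (t ++ ["x"]) = (t ++ ["x"]).length := by simp [h1]
    unfold pvDist
    rw [if_pos h2, if_pos hc, h1, hc]
    push_cast
    ring
  · have h1 : pvLead (t ++ ["x"]) = pvLead t := by simp [h, hc]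
    have h2 : ¬ pvLead (t ++ ["x"]) = (t ++ ["x"]).length := by simp [h1]; omega
    unfold pvDist
    rw [if_neg h2, if_neg hc, h1]

theorem pvDist_append_bus (t : List String) (b : String) (e : Int) (hb : b ≠ "x") :
    pvDist (t ++ [b]) e = pvDist t 1 := by
  have h := pvLead_append t b
  have hle := pvLead_le t
  by_cases hc : pvLead t = t.length
  · have h1 : pvLead (t ++ [b]) = t.length := by simp [h, hc, hb]
    have h2 : ¬ pvLead (t ++ [b]) = (t ++ [b]).length := by simp [h1]
    unfold pvDist
    rw [if_neg h2, if_pos hc, h1, hc]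
  · have h1 : pvLead (t ++ [b]) = pvLead t := by simp [h, hc]
    have h2 : ¬ pvLead (t ++ [b]) = (t ++ [b]).length := by simp [h1]; omega
    unfold pvDist
    rw [if_neg h2, if_neg hc, h1]

theorem pvG_append_x (s : List String) (e : Int) :
    pvG (s ++ ["x"]) e = pvG s (e + 1) := by
  induction s with
  | nil => simp [pvG]
  | cons h t ih =>
    by_cases hx : h = "x" <;> simp [pvG, hx, ih, pvDist_append_x]

theorem pvG_append_bus (s : List String) (b : String) (e : Int) (hb : b ≠ "x") :
    pvG (s ++ [b]) e = pvG s 1 ++ [(b, e)] := by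
  induction s with
  | nil => simp [pvG, pvDist, pvLead, hb]
  | cons h t ih =>
    by_cases hx : h = "x" <;> simp [pvG, hx, ih, pvDist_append_bus _ _ _ hb]

theorem pvR_eq_pvG (r : List String) (e : Int) : pvR r e = pvG r.reverse e := by
  induction r generalizing e with
  | nil => simp [pvR, pvG]
  | cons h t ih =>
    by_cases hx : h = "x"
    · simp [pvR, hx, ih, pvG_append_x]
    · simp [pvR, hx, ih, pvG_append_bus _ _ _ hx]

theorem pvFoldl_eq_pvR (r : List String) (res : List (String × Int)) (off : Int) :
    (r.foldl
      (fun (st : List (String × Int) × Int) i =>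
        if i = "x" then (st.1, st.2 + 1) else (st.1 ++ [(i, st.2)], 1))
      (res, off)).1 = res ++ (pvR r off).reverse := by
  induction r generalizing res off with
  | nil => simp [pvR]
  | cons h t ih =>
    by_cases hx : h = "x" <;> simp [List.foldl_cons, hx, ih, pvR]

theorem make_offset_tuples_eq_pvG (s : List String) :
    make_offset_tuples s = pvG s 1 := by
  show (s.reverse.foldl
      (fun (st : List (String × Int) × Int) i =>
        if i = "x" then (st.1, st.2 + 1) else (st.1 ++ [(i, st.2)], 1))
      ([], 1)).1.reverse = pvG s 1
  rw [pvFoldl_eq_pvR, pvR_eq_pvG]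
  simp

-- B side

theorem pvZip_eq_pvZ (buses : List (Int × String)) (n : Int) :
    (buses.zip ((buses.map Prod.fst).drop 1 ++ [n])).map
        (fun pq => (pq.1.2, pq.2 - pq.1.1)) = pvZ buses n := by
  induction buses with
  | nil => simp [pvZ]
  | cons p rest ih =>
    obtain ⟨i, v⟩ := p
    cases rest with
    | nil => simp [pvZ]
    | cons q r' =>
      obtain ⟨j, w⟩ := q
      simpa [pvZ] using ih

theorem pvFilter_nil_iff (t : List String) (s : Int) :
    (PySem.List.enumerate t s).filter (fun p => p.2 != "x") = [] ↔ pvLead t = t.length := by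
  induction t generalizing s with
  | nil => simp [PySem.List.enumerate_nil, pvLead]
  | cons h t ih =>
    rw [PySem.List.enumerate_cons, List.filter_cons]
    by_cases hx : h = "x"
    · rw [if_neg (by simp [hx])]
      rw [ih (s + 1), pvLead_cons, if_pos hx]
      simp only [List.length_cons]
      omega
    · rw [if_pos (by simpa using hx)]
      rw [pvLead_cons, if_neg hx]
      have hle := pvLead_le t
      simp only [List.length_cons]
      constructor
      · intro hcontra; simp at hcontra
      · omega

theorem pvFilter_head (t : List String) (s : Int) {j : Int} {w : String}
    {rest : List (Int × String)}
    (h : (PySem.List.enumerate t s).filter (fun p => p.2 != "x") = (j, w) :: rest) :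
    j = s + (pvLead t : Nat) := by
  induction t generalizing s with
  | nil => simp [PySem.List.enumerate_nil] at h
  | cons a t ih =>
    rw [PySem.List.enumerate_cons, List.filter_cons] at h
    by_cases hx : a = "x"
    · rw [if_neg (by simp [hx])] at h
      have := ih (s + 1) h
      rw [pvLead_cons, if_pos hx]
      push_cast at this ⊢
      omega
    · rw [if_pos (by simpa using hx)] at h
      cases h
      simp [pvLead_cons, hx]

theorem pvZ_filter_eq_pvG (t : List String) (s : Int) :
    pvZ ((PySem.List.enumerate t s).filter (fun p => p.2 != "x")) (s + t.length) = pvG t 1 := by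
  induction t generalizing s with
  | nil => simp [PySem.List.enumerate_nil, pvZ, pvG]
  | cons h t ih =>
    rw [PySem.List.enumerate_cons, List.filter_cons]
    by_cases hx : h = "x"
    · rw [if_neg (by simp [hx])]
      have hlen : (s : Int) + (((h :: t).length : Nat) : Int) = (s + 1) + ((t.length : Nat) : Int) := by
        push_cast [List.length_cons]; ring
      rw [hlen, ih (s + 1)]
      simp [pvG, hx]
    · rw [if_pos (by simpa using hx)]
      have hlen : (s : Int) + (((h :: t).length : Nat) : Int) = (s + 1) + ((t.length : Nat) : Int) := by
        push_cast [List.length_cons]; ring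
      rcases hF : (PySem.List.enumerate t (s + 1)).filter (fun p => p.2 != "x") with _ | ⟨⟨j, w⟩, rest⟩
      · have hall : pvLead t = t.length := (pvFilter_nil_iff t (s + 1)).mp hF
        have ht := ih (s + 1)
        rw [hF] at ht
        simp only [pvZ] at ht
        rw [hF, hlen]
        simp only [pvZ, pvG, if_neg hx]
        rw [← ht]
        have hval : (s + 1) + ((t.length : Nat) : Int) - s = pvDist t 1 := by
          unfold pvDist
          rw [if_pos hall, hall]
          push_cast
          ring
        rw [hval]
      · have hj : j = (s + 1) + (pvLead t : Nat) := pvFilter_head t (s + 1) hF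
        have hne : pvLead t ≠ t.length := by
          intro hc
          rw [(pvFilter_nil_iff t (s + 1)).mpr hc] at hF
          simp at hF
        have ht := ih (s + 1)
        rw [hF] at ht
        simp only [pvZ] at ht
        rw [hF, hlen]
        simp only [pvZ, pvG, if_neg hx]
        rw [ht]
        have hval : j - s = pvDist t 1 := by
          unfold pvDist
          rw [if_neg hne, hj]
          push_cast
          ring
        rw [hval]

theorem make_offset_tuples_alt_eq_pvG (s : List String) :
    make_offset_tuples_alt s = pvG s 1 := by
  have h1 := pvZip_eq_pvZ ((PySem.List.enumerate s).filter (fun p => p.2 != "x")) (s.length : Int)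
  have h2 := pvZ_filter_eq_pvG s 0
  simp only [make_offset_tuples_alt]
  rw [h1]
  simpa using h2

-- ===== VERDICT (by name: the statement is the Claim_ definition above) =====
theorem make_offset_tuples_spec : Claim_equal_make_offset_tuples := by
  intro s _
  unfold Spec_make_offset_tuples
  rw [make_offset_tuples_eq_pvG, make_offset_tuples_alt_eq_pvG]
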